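-- pv_equiv track=rewrite | github.com/prokokok/programmers | 스택_큐/Lv2_사전부분문자열.py | solution
-- ===== SOURCE A (Python) =====
-- def solution(s):
--     stack = []
--
--     for char in s:
--         while stack and stack[-1] < char:
--             stack.pop()
--         stack.append(char)
--
--     answer = ''.join(stack)
--     return answer
-- ===== SOURCE B (Python) =====
-- def solution(s):
--     best = None
--     out = []
--     for ch in reversed(s):
--         if best is None or ch >= best:
--             out.append(ch)
--             best = ch
--     return ''.join(reversed(out))
-- ===== Notes on version B (the rewrite author's own statement) =====
-- stated objective: simpler
-- what changed: Replaces the stack with its inner pop-while loop by a single right-to-left pass keeping a character iff it is >= the running maximum of the suffix, then reversing the collected list.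
import Mathlib
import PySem

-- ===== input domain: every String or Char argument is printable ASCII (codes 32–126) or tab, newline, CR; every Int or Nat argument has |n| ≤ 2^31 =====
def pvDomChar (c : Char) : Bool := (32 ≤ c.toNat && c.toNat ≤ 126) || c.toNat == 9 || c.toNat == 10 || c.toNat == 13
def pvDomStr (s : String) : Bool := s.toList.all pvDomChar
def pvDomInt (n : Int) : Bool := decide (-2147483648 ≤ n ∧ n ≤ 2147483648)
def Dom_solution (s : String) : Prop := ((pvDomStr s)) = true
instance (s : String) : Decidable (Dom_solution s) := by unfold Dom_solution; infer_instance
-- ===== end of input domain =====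

-- B replaces A's stack with inner pop-while loop by one right-to-left pass
-- keeping each char that is ≥ the running maximum of the suffix (objective: simpler).


-- ===== PORT A =====
-- The Python stack is encoded with its TOP as the list HEAD (the list is the
-- reversed Python stack): stack[-1] is the head, pop is the tail, append is cons;
-- ''.join(stack) is String.mk of the reverse.
-- the while loop: pop while the top exists and is < char
def popLoop (c : Char) : List Char → List Char
  | [] => []
  | t :: rest => if t < c then popLoop c rest else t :: rest

def solution (s : String) : String :=
  let stack := s.toList.foldl (fun st char => char :: popLoop char st) []
  String.mk stack.reverse

-- ===== PORT B =====
def solution_alt (s : String) : String :=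
  let p := s.toList.reverse.foldl
    (fun (p : Option Char × List Char) ch =>
      match p.1 with
      | none => (some ch, p.2 ++ [ch])
      | some best => if best ≤ ch then (some ch, p.2 ++ [ch]) else p)
    (none, [])
  String.mk p.2.reverse

-- ===== PRECONDITION & SPEC =====
def Spec_solution (s : String) (out : String) : Prop := out = solution_alt s
instance (s : String) (out : String) : Decidable (Spec_solution s out) := by unfold Spec_solution; infer_instance

-- ===== CLAIM (what is proved, stated in full; the proofs are below) =====
def Claim_equal_solution : Prop := ∀ (s : String), Dom_solution s → Spec_solution s (solution s)

-- ===== LEMMAS AND PROOFS =====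

-- suffix maximum (none for the empty list) and the list of kept characters:
-- a character is kept iff it is ≥ the maximum of everything after it
def sufMax : List Char → Option Char
  | [] => none
  | c :: rest =>
    match sufMax rest with
    | none => some c
    | some m => some (max c m)

def kept : List Char → List Char
  | [] => []
  | c :: rest =>
    match sufMax rest with
    | none => c :: kept rest
    | some m => if m ≤ c then c :: kept rest else kept rest

theorem popLoop_eq_filter (c : Char) (st : List Char) (h : st.Sorted (· ≤ ·)) :
    popLoop c st = st.filter (fun t => c ≤ t) := by
  induction st with
  | nil => rfl
  | cons t rest ih =>
    rcases List.sorted_cons.mp h with ⟨hall, hrest⟩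
    by_cases hlt : t < c
    · simp [popLoop, hlt, not_le.mpr hlt, ih hrest]
    · have hc : c ≤ t := not_lt.mp hlt
      have : rest.filter (fun t => c ≤ t) = rest := by
        apply List.filter_eq_self.mpr
        intro x hx
        exact decide_eq_true (le_trans hc (hall x hx))
      simp [popLoop, hlt, hc, this]

theorem step_sorted (c : Char) (st : List Char) (h : st.Sorted (· ≤ ·)) :
    (c :: st.filter (fun t => c ≤ t)).Sorted (· ≤ ·) := by
  refine List.sorted_cons.mpr ⟨?_, h.filter _⟩
  intro x hx
  exact of_decide_eq_true (List.mem_filter.mp hx).2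

-- main invariant for A's fold: on a sorted (reversed-)stack the fold produces
-- the reversed kept list followed by the stack entries ≥ the suffix max
theorem foldA_eq (xs : List Char) : ∀ (st : List Char), st.Sorted (· ≤ ·) →
    xs.foldl (fun st char => char :: popLoop char st) st =
      (kept xs).reverse ++
        (match sufMax xs with
         | none => st
         | some m => st.filter (fun t => m ≤ t)) := by
  induction xs with
  | nil => intro st _; simp [kept, sufMax]
  | cons c rest ih =>
    intro st hst
    have hpop := popLoop_eq_filter c st hst
    have hsorted := step_sorted c st hst
    have := ih (c :: st.filter (fun t => c ≤ t)) hsorted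
    simp only [List.foldl_cons, hpop, this]
    cases hm : sufMax rest with
    | none =>
      -- rest contributes no max; sufMax (c :: rest) = some c, c is kept
      simp [kept, sufMax, hm, List.filter]
    | some m =>
      by_cases hmc : m ≤ c
      · have h1 : (st.filter (fun t => c ≤ t)).filter (fun t => m ≤ t)
            = st.filter (fun t => c ≤ t) := by
          apply List.filter_eq_self.mpr
          intro x hx
          exact decide_eq_true (le_trans hmc (of_decide_eq_true (List.mem_filter.mp hx).2))
        simp [kept, sufMax, hm, hmc, max_eq_left hmc, List.filter, h1]
      · have hcm : c < m := not_le.mp hmc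
        have h1 : (st.filter (fun t => c ≤ t)).filter (fun t => m ≤ t)
            = st.filter (fun t => m ≤ t) := by
          rw [List.filter_filter]
          apply List.filter_congr
          intro x _
          by_cases hmx : m ≤ x
          · simp [hmx, le_trans (le_of_lt hcm) hmx]
          · simp [hmx]
        simp [kept, sufMax, hm, hmc, max_eq_right (le_of_lt hcm), List.filter, h1]

-- B's fold (as a foldr after foldl_reverse) computes (sufMax, reversed kept list)
theorem foldB_eq (xs : List Char) :
    xs.foldr
      (fun ch (p : Option Char × List Char) =>
        match p.1 with
        | none => (some ch, p.2 ++ [ch])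
        | some best => if best ≤ ch then (some ch, p.2 ++ [ch]) else p)
      (none, []) = (sufMax xs, (kept xs).reverse) := by
  induction xs with
  | nil => rfl
  | cons c rest ih =>
    simp only [List.foldr_cons, ih]
    cases hm : sufMax rest with
    | none => simp [sufMax, kept, hm]
    | some m =>
      by_cases hmc : m ≤ c
      · simp [sufMax, kept, hm, hmc, max_eq_left hmc]
      · simp [sufMax, kept, hm, hmc, max_eq_right (le_of_lt (not_le.mp hmc))]

-- ===== VERDICT (by name: the statement is the Claim_ definition above) =====
theorem solution_spec : Claim_equal_solution := by
  intro s _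
  unfold Spec_solution solution solution_alt
  have hA := foldA_eq s.toList [] List.sorted_nil
  rw [List.foldl_reverse, foldB_eq, hA]
  cases hm : sufMax s.toList <;> simp
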